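-- pv_equiv track=rewrite | github.com/Merpster456/CS451 | minesweeper/greedy_sweeper.py | validate_arrangement
-- ===== SOURCE A (Python) =====
-- import itertools
--
-- def validate_arrangement(board, mine_board, revealed):
--     rows, cols = len(board), len(board[0])
--     for r in range(rows):
--         for c in range(cols):
--             if revealed[r][c] and board[r][c] >= 0:  # If it's a clue
--                 count_mines = 0
--                 for dr, dc in itertools.product([-1, 0, 1], [-1, 0, 1]):
--                     nr, nc = r + dr, c + dc
--                     if 0 <= nr < rows and 0 <= nc < cols:
--                         count_mines += mine_board[nr][nc]
--                 if count_mines != board[r][c]: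
--                     return False
--     return True
-- ===== SOURCE B (Python) =====
-- import itertools
--
-- def validate_arrangement(board, mine_board, revealed):
--     rows, cols = len(board), len(board[0])
--     # per-row prefix sums: pref[i][j] = sum(mine_board[i][:j])
--     pref = [list(itertools.accumulate(row, initial=0)) for row in mine_board]
--     for r in range(rows):
--         for c in range(cols):
--             if revealed[r][c] and board[r][c] >= 0:
--                 c0, c1 = max(0, c - 1), min(cols - 1, c + 1)
--                 total = sum(pref[i][c1 + 1] - pref[i][c0]
--                             for i in range(max(0, r - 1), min(rows - 1, r + 1) + 1))
--                 if total != board[r][c]: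
--                     return False
--     return True
-- ===== Notes on version B (the rewrite author's own statement) =====
-- stated objective: alternative
-- what changed: B precomputes a per-row prefix-sum table of mine_board once and evaluates each clue's 3x3 mine count as at most three O(1) window differences, instead of A's inner 9-delta scan with per-neighbor bounds checks.
-- outside the precondition, e.g. on validate_arrangement([[0]], [[0, 5]], [[True]]): A returns True, B returns True
import Mathlib
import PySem

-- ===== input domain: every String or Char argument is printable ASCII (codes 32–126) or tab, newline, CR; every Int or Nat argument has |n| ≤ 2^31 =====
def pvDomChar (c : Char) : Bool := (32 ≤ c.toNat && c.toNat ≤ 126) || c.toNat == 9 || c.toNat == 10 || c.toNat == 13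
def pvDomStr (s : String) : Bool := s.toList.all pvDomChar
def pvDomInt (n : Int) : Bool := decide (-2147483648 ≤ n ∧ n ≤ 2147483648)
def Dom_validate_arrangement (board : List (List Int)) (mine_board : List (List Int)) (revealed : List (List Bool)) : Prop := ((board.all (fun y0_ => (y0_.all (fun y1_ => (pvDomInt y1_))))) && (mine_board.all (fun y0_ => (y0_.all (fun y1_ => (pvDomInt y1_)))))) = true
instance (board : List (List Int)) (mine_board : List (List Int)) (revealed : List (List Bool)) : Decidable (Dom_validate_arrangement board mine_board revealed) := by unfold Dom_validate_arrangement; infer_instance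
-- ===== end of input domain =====

-- B replaces A's 9-delta inner neighbor scan by a per-row prefix-sum table queried with window differences; same asymptotic cost (objective: alternative).

-- ===== PORT A =====
-- inner loop of A: count_mines over itertools.product([-1,0,1],[-1,0,1]) with bounds checks
def va_count (mine_board : List (List Int)) (rows cols r c : Int) : Int :=
  (([-1, 0, 1] : List Int).flatMap (fun dr => ([-1, 0, 1] : List Int).map (fun dc => (dr, dc)))).foldl
    (fun acc d =>
      let nr := r + d.1
      let nc := c + d.2
      if 0 ≤ nr ∧ nr < rows ∧ 0 ≤ nc ∧ nc < cols then
        acc + PySem.List.pyGetD (PySem.List.pyGetD mine_board nr []) nc 0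
      else acc) 0

def validate_arrangement (board : List (List Int)) (mine_board : List (List Int)) (revealed : List (List Bool)) : Bool :=
  let rows : Int := board.length
  let cols : Int := (board.headD []).length
  (PySem.List.pyRange 0 rows 1).all (fun r =>
    (PySem.List.pyRange 0 cols 1).all (fun c =>
      if PySem.List.pyGetD (PySem.List.pyGetD revealed r []) c false
          && decide (0 ≤ PySem.List.pyGetD (PySem.List.pyGetD board r []) c 0) then
        decide (va_count mine_board rows cols r c = PySem.List.pyGetD (PySem.List.pyGetD board r []) c 0)
      else true))

-- ===== PORT B =====
-- total of B: sum over the clamped row range of prefix-window differences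
def vaAlt_total (pref : List (List Int)) (rows cols r c : Int) : Int :=
  let c0 := max 0 (c - 1)
  let c1 := min (cols - 1) (c + 1)
  (PySem.List.pyRange (max 0 (r - 1)) (min (rows - 1) (r + 1) + 1) 1).foldl
    (fun acc i =>
      acc + (PySem.List.pyGetD (PySem.List.pyGetD pref i []) (c1 + 1) 0
             - PySem.List.pyGetD (PySem.List.pyGetD pref i []) c0 0)) 0

def validate_arrangement_alt (board : List (List Int)) (mine_board : List (List Int)) (revealed : List (List Bool)) : Bool :=
  let rows : Int := board.length
  let cols : Int := (board.headD []).length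
  let pref := mine_board.map (fun row => List.scanl (· + ·) 0 row)   -- itertools.accumulate(row, initial=0)
  (PySem.List.pyRange 0 rows 1).all (fun r =>
    (PySem.List.pyRange 0 cols 1).all (fun c =>
      if PySem.List.pyGetD (PySem.List.pyGetD revealed r []) c false
          && decide (0 ≤ PySem.List.pyGetD (PySem.List.pyGetD board r []) c 0) then
        decide (vaAlt_total pref rows cols r c = PySem.List.pyGetD (PySem.List.pyGetD board r []) c 0)
      else true))

-- ===== PRECONDITION & SPEC =====
-- Pre_ excludes the empty board (A raises IndexError on board[0]) and ragged or size-mismatched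
-- grids: there A may return by accident of which cells its traversal happens to index, while B
-- reads every mine_board row in full; rectangular equal-size grids are the function's natural domain.
def Pre_validate_arrangement (board : List (List Int)) (mine_board : List (List Int)) (revealed : List (List Bool)) : Prop :=
  board ≠ [] ∧
  (∀ row ∈ board, row.length = (board.headD []).length) ∧
  mine_board.length = board.length ∧
  (∀ row ∈ mine_board, row.length = (board.headD []).length) ∧
  revealed.length = board.length ∧
  (∀ row ∈ revealed, row.length = (board.headD []).length)
instance (board : List (List Int)) (mine_board : List (List Int)) (revealed : List (List Bool)) : Decidable (Pre_validate_arrangement board mine_board revealed) := by unfold Pre_validate_arrangement; infer_instance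

def pvWitness_validate_arrangement : List (List Int) × List (List Int) × List (List Bool) :=
  ([[1, 0], [0, 0]], [[0, 1], [0, 0]], [[true, false], [false, false]])

def Spec_validate_arrangement (board : List (List Int)) (mine_board : List (List Int)) (revealed : List (List Bool)) (out : Bool) : Prop := out = validate_arrangement_alt board mine_board revealed
instance (board : List (List Int)) (mine_board : List (List Int)) (revealed : List (List Bool)) (out : Bool) : Decidable (Spec_validate_arrangement board mine_board revealed out) := by unfold Spec_validate_arrangement; infer_instance

-- ===== CLAIM (what is proved, stated in full; the proofs are below) =====
def Claim_equal_validate_arrangement : Prop := ∀ (board : List (List Int)) (mine_board : List (List Int)) (revealed : List (List Bool)), Dom_validate_arrangement board mine_board revealed → Pre_validate_arrangement board mine_board revealed → Spec_validate_arrangement board mine_board revealed (validate_arrangement board mine_board revealed)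

-- ===== LEMMAS AND PROOFS =====

-- prefix characterization of Python's accumulate(row, initial=a)
lemma scanl_getD_sum (row : List Int) (a : Int) (j : Nat) (hj : j ≤ row.length) :
    (List.scanl (· + ·) a row).getD j 0 = a + (row.take j).sum := by
  induction row generalizing a j with
  | nil =>
      have hj0 : j = 0 := by simpa using hj
      subst hj0; simp [List.scanl_nil]
  | cons x xs ih =>
      cases j with
      | zero => simp [List.scanl_cons]
      | succ j =>
          simp only [List.scanl_cons, List.getD_cons_succ, List.take_succ_cons, List.sum_cons]
          rw [ih (a + x) j (by simpa using hj)]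
          ring

lemma take_sum_succ (row : List Int) (k : Nat) (hk : k < row.length) :
    (row.take (k + 1)).sum = (row.take k).sum + row.getD k 0 := by
  rw [List.sum_take_succ row k hk, List.getD_eq_getElem row 0 hk]

lemma pyGetD_toNat {α : Type} (xs : List α) (i : Int) (h0 : 0 ≤ i) (d : α) :
    PySem.List.pyGetD xs i d = xs.getD i.toNat d := by
  have h : i = ((i.toNat : Nat) : Int) := (Int.toNat_of_nonneg h0).symm
  rw [h, PySem.List.pyGetD_natCast, Int.toNat_natCast]

lemma prefAt (row : List Int) (i : Int) (h0 : 0 ≤ i) (h1 : i ≤ (row.length : Int)) :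
    PySem.List.pyGetD (List.scanl (· + ·) 0 row) i 0 = (row.take i.toNat).sum := by
  rw [pyGetD_toNat _ _ h0, scanl_getD_sum row 0 i.toNat (by omega), zero_add]

-- one row's prefix-window equals the guarded three-neighbor sum
lemma rowWin (row : List Int) (cols c : Int) (hlen : (row.length : Int) = cols)
    (h0 : 0 ≤ c) (hc : c < cols) :
    PySem.List.pyGetD (List.scanl (· + ·) 0 row) (min (cols - 1) (c + 1) + 1) 0
      - PySem.List.pyGetD (List.scanl (· + ·) 0 row) (max 0 (c - 1)) 0
    = (if 0 ≤ c - 1 then PySem.List.pyGetD row (c - 1) 0 else 0)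
      + PySem.List.pyGetD row c 0
      + (if c + 1 < cols then PySem.List.pyGetD row (c + 1) 0 else 0) := by
  have hlenN : row.length = cols.toNat := by omega
  by_cases hL : 0 ≤ c - 1 <;> by_cases hR : c + 1 < cols
  · -- interior
    rw [max_eq_right hL, min_eq_right (by omega : c + 1 ≤ cols - 1)]
    rw [prefAt row (c + 1 + 1) (by omega) (by omega), prefAt row (c - 1) hL (by omega)]
    rw [if_pos hL, if_pos hR]
    rw [pyGetD_toNat row (c - 1) hL, pyGetD_toNat row c h0, pyGetD_toNat row (c + 1) (by omega)]
    have hm1 : (c + 1 + 1).toNat = (c - 1).toNat + 3 := by omega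
    have hm2 : c.toNat = (c - 1).toNat + 1 := by omega
    have hm3 : (c + 1).toNat = (c - 1).toNat + 2 := by omega
    rw [hm1, hm2, hm3,
        take_sum_succ row ((c - 1).toNat + 2) (by omega),
        take_sum_succ row ((c - 1).toNat + 1) (by omega),
        take_sum_succ row ((c - 1).toNat) (by omega)]
    ring
  · -- right edge: cols = c + 1
    rw [max_eq_right hL, min_eq_left (by omega : cols - 1 ≤ c + 1)]
    rw [show cols - 1 + 1 = cols by ring]
    rw [prefAt row cols (by omega) (by omega), prefAt row (c - 1) hL (by omega)]
    rw [if_pos hL, if_neg hR]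
    rw [pyGetD_toNat row (c - 1) hL, pyGetD_toNat row c h0]
    have hm1 : cols.toNat = (c - 1).toNat + 2 := by omega
    have hm2 : c.toNat = (c - 1).toNat + 1 := by omega
    rw [hm1, hm2,
        take_sum_succ row ((c - 1).toNat + 1) (by omega),
        take_sum_succ row ((c - 1).toNat) (by omega)]
    ring
  · -- left edge: c = 0
    have hc0 : c = 0 := by omega
    subst hc0
    rw [max_eq_left (by omega), min_eq_right (by omega : (0:Int) + 1 ≤ cols - 1)]
    rw [prefAt row (0 + 1 + 1) (by omega) (by omega), prefAt row 0 le_rfl (by omega)]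
    rw [if_neg hL, if_pos hR]
    rw [pyGetD_toNat row 0 le_rfl, pyGetD_toNat row (0 + 1) (by omega)]
    rw [show ((0:Int) + 1 + 1).toNat = 2 by rfl, show ((0:Int) + 1).toNat = 1 by rfl,
        show (0:Int).toNat = 0 by rfl,
        take_sum_succ row 1 (by omega), take_sum_succ row 0 (by omega)]
    simp
  · -- single cell: c = 0, cols = 1
    have hc0 : c = 0 := by omega
    subst hc0
    rw [max_eq_left (by omega), min_eq_left (by omega : cols - 1 ≤ (0:Int) + 1)]
    rw [show cols - 1 + 1 = cols by ring]
    rw [prefAt row cols (by omega) (by omega), prefAt row 0 le_rfl (by omega)]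
    rw [if_neg hL, if_neg hR]
    rw [pyGetD_toNat row 0 le_rfl]
    rw [show cols.toNat = 1 by omega, show (0:Int).toNat = 0 by rfl,
        take_sum_succ row 0 (by omega)]
    simp

lemma pref_lookup (mine_board : List (List Int)) (rows i : Int)
    (hmlen : (mine_board.length : Int) = rows) (h0 : 0 ≤ i) (h1 : i < rows) :
    PySem.List.pyGetD (mine_board.map (fun row => List.scanl (· + ·) 0 row)) i []
      = List.scanl (· + ·) 0 (PySem.List.pyGetD mine_board i []) := by
  have hk : i.toNat < mine_board.length := by omega
  rw [pyGetD_toNat _ _ h0, pyGetD_toNat _ _ h0,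
      List.getD_eq_getElem _ _ (by simpa using hk), List.getD_eq_getElem _ _ hk,
      List.getElem_map]

lemma row_mem (mine_board : List (List Int)) (rows i : Int)
    (hmlen : (mine_board.length : Int) = rows) (h0 : 0 ≤ i) (h1 : i < rows) :
    PySem.List.pyGetD mine_board i [] ∈ mine_board := by
  have hk : i.toNat < mine_board.length := by omega
  rw [pyGetD_toNat _ _ h0, List.getD_eq_getElem _ _ hk]
  exact List.getElem_mem hk

lemma addIf (P : Prop) [Decidable P] (a x : Int) :
    (if P then a + x else a) = a + (if P then x else 0) := by
  split_ifs <;> simp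

-- the heart of the equivalence: A's 9-delta guarded neighbor count equals B's prefix-window total
lemma cell_eq (mine_board : List (List Int)) (rows cols r c : Int)
    (hmlen : (mine_board.length : Int) = rows)
    (hrow : ∀ row ∈ mine_board, (row.length : Int) = cols)
    (hr0 : 0 ≤ r) (hr1 : r < rows) (hc0 : 0 ≤ c) (hc1 : c < cols) :
    va_count mine_board rows cols r c
      = vaAlt_total (mine_board.map (fun row => List.scanl (· + ·) 0 row)) rows cols r c := by
  by_cases hA : 0 ≤ r - 1 <;> by_cases hB : r + 1 < rows
  · -- interior rows: the window is [r-1, r, r+1]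
    unfold va_count vaAlt_total
    simp only [List.flatMap, List.map, List.flatten, List.append]
    rw [max_eq_right hA, min_eq_right (by omega : r + 1 ≤ rows - 1)]
    rw [PySem.List.pyRange_one_cons (by omega), PySem.List.pyRange_one_cons (by omega),
        PySem.List.pyRange_one_cons (by omega), PySem.List.pyRange_one_eq_nil (by omega)]
    simp only [List.foldl, addIf, zero_add]
    rw [show r - 1 + 1 + 1 = r + 1 from by ring, show r - 1 + 1 = r from by ring]
    rw [pref_lookup mine_board rows (r-1) hmlen (by omega) (by omega),
        pref_lookup mine_board rows r hmlen (by omega) (by omega),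
        pref_lookup mine_board rows (r+1) hmlen (by omega) (by omega)]
    rw [rowWin _ cols c (hrow _ (row_mem mine_board rows (r-1) hmlen (by omega) (by omega))) hc0 hc1,
        rowWin _ cols c (hrow _ (row_mem mine_board rows r hmlen (by omega) (by omega))) hc0 hc1,
        rowWin _ cols c (hrow _ (row_mem mine_board rows (r+1) hmlen (by omega) (by omega))) hc0 hc1]
    simp only [sub_eq_add_neg, add_zero,
      show (0:Int) ≤ r + -1 by omega, show r + -1 < rows by omega,
      show (0:Int) ≤ r by omega, show r < rows by omega,
      show (0:Int) ≤ r + 1 by omega, show r + 1 < rows by omega,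
      show (0:Int) ≤ c by omega, show c < cols by omega,
      show c + -1 < cols by omega, show (0:Int) ≤ c + 1 by omega,
      true_and, and_true, false_and, and_false, if_true, if_false]
    ring
  · -- bottom edge: r = rows - 1, window [r-1, r]
    unfold va_count vaAlt_total
    simp only [List.flatMap, List.map, List.flatten, List.append]
    rw [max_eq_right hA, min_eq_left (by omega : rows - 1 ≤ r + 1),
        show rows - 1 + 1 = rows by ring, show rows = r + 1 by omega]
    rw [PySem.List.pyRange_one_cons (by omega), PySem.List.pyRange_one_cons (by omega),
        PySem.List.pyRange_one_eq_nil (by omega)]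
    simp only [List.foldl, addIf, zero_add, add_zero]
    rw [show r - 1 + 1 = r from by ring]
    rw [pref_lookup mine_board (r+1) (r-1) (by omega) (by omega) (by omega),
        pref_lookup mine_board (r+1) r (by omega) (by omega) (by omega)]
    rw [rowWin _ cols c (hrow _ (row_mem mine_board (r+1) (r-1) (by omega) (by omega) (by omega))) hc0 hc1,
        rowWin _ cols c (hrow _ (row_mem mine_board (r+1) r (by omega) (by omega) (by omega))) hc0 hc1]
    simp only [sub_eq_add_neg, add_zero, zero_add,
      show (0:Int) ≤ r + -1 by omega, show r + -1 < r + 1 by omega,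
      show (0:Int) ≤ r by omega, show r < r + 1 by omega,
      show ¬(r + 1 < r + 1) by omega,
      show (0:Int) ≤ c by omega, show c < cols by omega,
      show c + -1 < cols by omega, show (0:Int) ≤ c + 1 by omega,
      true_and, and_true, false_and, and_false, if_true, if_false]
    ring_nf
  · -- top edge: r = 0, window [0, 1]
    have hr : r = 0 := by omega
    subst hr
    unfold va_count vaAlt_total
    simp only [List.flatMap, List.map, List.flatten, List.append]
    rw [max_eq_left (by omega : (0:Int) - 1 ≤ 0), min_eq_right (by omega : (0:Int) + 1 ≤ rows - 1)]
    rw [PySem.List.pyRange_one_cons (by omega), PySem.List.pyRange_one_cons (by omega),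
        PySem.List.pyRange_one_eq_nil (by omega)]
    simp only [List.foldl, addIf, zero_add, add_zero]
    rw [pref_lookup mine_board rows 0 hmlen (by omega) (by omega),
        pref_lookup mine_board rows 1 hmlen (by omega) (by omega)]
    rw [rowWin _ cols c (hrow _ (row_mem mine_board rows 0 hmlen (by omega) (by omega))) hc0 hc1,
        rowWin _ cols c (hrow _ (row_mem mine_board rows 1 hmlen (by omega) (by omega))) hc0 hc1]
    simp only [sub_eq_add_neg, add_zero, zero_add,
      show ¬((0:Int) ≤ -1) by omega,
      show (0:Int) ≤ 0 by omega, show (0:Int) < rows by omega,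
      show (0:Int) ≤ 1 by omega, show (1:Int) < rows by omega,
      show (0:Int) ≤ c by omega, show c < cols by omega,
      show c + -1 < cols by omega, show (0:Int) ≤ c + 1 by omega,
      true_and, and_true, false_and, and_false, if_true, if_false]
    ring_nf
  · -- single row: rows = 1, window [0]
    have hr : r = 0 := by omega
    subst hr
    have hrows : rows = 1 := by omega
    subst hrows
    unfold va_count vaAlt_total
    simp only [List.flatMap, List.map, List.flatten, List.append]
    rw [max_eq_left (by omega : (0:Int) - 1 ≤ 0), min_eq_left (by omega : (1:Int) - 1 ≤ 0 + 1),
        show (1:Int) - 1 + 1 = 1 by ring]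
    rw [PySem.List.pyRange_one_cons (by omega), PySem.List.pyRange_one_eq_nil (by omega)]
    simp only [List.foldl, addIf, zero_add, add_zero]
    rw [pref_lookup mine_board 1 0 (by omega) (by omega) (by omega)]
    rw [rowWin _ cols c (hrow _ (row_mem mine_board 1 0 (by omega) (by omega) (by omega))) hc0 hc1]
    simp only [sub_eq_add_neg, add_zero, zero_add,
      show ¬((0:Int) ≤ -1) by omega,
      show (0:Int) ≤ 0 by omega, show (0:Int) < 1 by omega,
      show ¬((1:Int) < 1) by omega,
      show (0:Int) ≤ c by omega, show c < cols by omega,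
      show c + -1 < cols by omega, show (0:Int) ≤ c + 1 by omega,
      true_and, and_true, false_and, and_false, if_true, if_false]

lemma allCong {α : Type} (l : List α) (f g : α → Bool) (h : ∀ x ∈ l, f x = g x) :
    l.all f = l.all g := by
  induction l with
  | nil => rfl
  | cons x xs ih => simp only [List.all_cons, h x (by simp), ih (fun y hy => h y (by simp [hy]))]

-- ===== VERDICT (by name: the statement is the Claim_ definition above) =====
theorem validate_arrangement_spec : Claim_equal_validate_arrangement := by
  intro board mine_board revealed _hdom hpre
  obtain ⟨-, -, hmlen, hmrow, -, -⟩ := hpre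
  unfold Spec_validate_arrangement validate_arrangement validate_arrangement_alt
  refine allCong _ _ _ (fun r hrmem => ?_)
  refine allCong _ _ _ (fun c hcmem => ?_)
  obtain ⟨hr0, hr1⟩ := PySem.List.mem_pyRange_one.mp hrmem
  obtain ⟨hc0, hc1⟩ := PySem.List.mem_pyRange_one.mp hcmem
  split
  case isTrue h =>
    rw [cell_eq mine_board _ _ r c (by exact_mod_cast hmlen)
      (fun row hrw => by exact_mod_cast hmrow row hrw) hr0 hr1 hc0 hc1]
  case isFalse h => rfl
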